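-- pv_equiv track=rewrite | github.com/SKIRT/PTS | core/tools/strings.py | split_except_within
-- ===== SOURCE A (Python) =====
-- def split_except_within(text, pattern, add_pattern=True):
--
--     """
--     This function ...
--     :param text:
--     :param pattern:
--     :param add_pattern:
--     :return:
--     """
--
--     parts = []
--     lst = text.split(pattern)
--     for i, item in enumerate(lst):
--         if i % 2:
--             if add_pattern: parts.append(pattern + item + pattern)
--             else: parts.append(item)
--         else:
--             for a in item.split(): parts.append(a)
--     return parts
-- ===== SOURCE B (Python) =====
-- def split_except_within(text, pattern, add_pattern=True):
--     def go(segs):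
--         if not segs:
--             return []
--         if len(segs) == 1:
--             return segs[0].split()
--         mid = pattern + segs[1] + pattern if add_pattern else segs[1]
--         return segs[0].split() + [mid] + go(segs[2:])
--     return go(text.split(pattern))
-- ===== Notes on version B (the rewrite author's own statement) =====
-- stated objective: simpler
-- what changed: Replaces the enumerate/index-parity accumulator loop by a direct recursion that consumes the segment list two at a time (outside segment, inside segment), eliminating index arithmetic and the parity test.
import Mathlib
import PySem

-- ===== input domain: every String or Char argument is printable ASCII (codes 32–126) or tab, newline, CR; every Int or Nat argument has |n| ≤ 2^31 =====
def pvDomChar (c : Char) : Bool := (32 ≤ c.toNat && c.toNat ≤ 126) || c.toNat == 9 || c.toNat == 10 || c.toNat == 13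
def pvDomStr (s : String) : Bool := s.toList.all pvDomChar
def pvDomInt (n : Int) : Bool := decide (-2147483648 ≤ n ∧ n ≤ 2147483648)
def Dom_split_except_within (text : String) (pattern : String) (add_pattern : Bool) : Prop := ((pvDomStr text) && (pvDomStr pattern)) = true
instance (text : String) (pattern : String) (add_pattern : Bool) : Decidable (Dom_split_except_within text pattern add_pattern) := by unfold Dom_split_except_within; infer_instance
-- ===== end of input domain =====

-- B replaces A's enumerate/index-parity loop by a recursion over the segment list two
-- at a time (objective: simpler — no index arithmetic or parity test); same complexity.

-- ===== PORT A =====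
-- A: split text on pattern; odd-indexed segments kept whole (optionally re-wrapped in
-- pattern), even-indexed segments whitespace-split; accumulated over enumerate().
def split_except_within (text : String) (pattern : String) (add_pattern : Bool) : List String :=
  match PySem.Str.split? text pattern with
  | none => []   -- Python raises ValueError here (empty separator); excluded by Pre_
  | some lst =>
    (PySem.List.enumerate lst 0).foldl
      (fun parts p =>
        if PySem.Int.mod p.1 2 ≠ 0 then
          if add_pattern then parts ++ [pattern ++ p.2 ++ pattern] else parts ++ [p.2]
        else parts ++ PySem.Str.split₀ p.2) []

-- ===== PORT B =====
-- B's helper: consume the segment list two at a time (outside, inside).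
def sewGo (pattern : String) (add_pattern : Bool) : List String → List String
  | [] => []
  | [s] => PySem.Str.split₀ s
  | s :: t :: rest =>
    PySem.Str.split₀ s
      ++ [if add_pattern then pattern ++ t ++ pattern else t]
      ++ sewGo pattern add_pattern rest

def split_except_within_alt (text : String) (pattern : String) (add_pattern : Bool) : List String :=
  match PySem.Str.split? text pattern with
  | none => []   -- Python's str.split raises ValueError here; excluded by Pre_
  | some segs => sewGo pattern add_pattern segs

-- ===== PRECONDITION & SPEC =====
-- Pre_ excludes only pattern = "", where Python's text.split(pattern) raises ValueError.
def Pre_split_except_within (text : String) (pattern : String) (add_pattern : Bool) : Prop :=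
  pattern ≠ ""
instance (text : String) (pattern : String) (add_pattern : Bool) : Decidable (Pre_split_except_within text pattern add_pattern) := by unfold Pre_split_except_within; infer_instance

def pvWitness_split_except_within : String × String × Bool := ("a 'b c' d", "'", true)

def Spec_split_except_within (text : String) (pattern : String) (add_pattern : Bool) (out : List String) : Prop := out = split_except_within_alt text pattern add_pattern
instance (text : String) (pattern : String) (add_pattern : Bool) (out : List String) : Decidable (Spec_split_except_within text pattern add_pattern out) := by unfold Spec_split_except_within; infer_instance

-- ===== CLAIM (what is proved, stated in full; the proofs are below) =====
def Claim_equal_split_except_within : Prop := ∀ (text : String) (pattern : String) (add_pattern : Bool), Dom_split_except_within text pattern add_pattern → Pre_split_except_within text pattern add_pattern → Spec_split_except_within text pattern add_pattern (split_except_within text pattern add_pattern)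

-- ===== LEMMAS AND PROOFS =====

-- A's parity-indexed fold over the segment list equals B's two-at-a-time recursion.
theorem sew_fold_eq_go (pattern : String) (add_pattern : Bool) :
    ∀ (segs : List String) (k : Int) (acc : List String),
      (PySem.List.enumerate segs (2 * k)).foldl
        (fun parts p =>
          if PySem.Int.mod p.1 2 ≠ 0 then
            if add_pattern then parts ++ [pattern ++ p.2 ++ pattern] else parts ++ [p.2]
          else parts ++ PySem.Str.split₀ p.2) acc
      = acc ++ sewGo pattern add_pattern segs
  | [], k, acc => by simp [PySem.List.enumerate_nil, sewGo]
  | [s], k, acc => by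
    have h0 : PySem.Int.mod (2 * k) 2 = 0 := by
      rw [PySem.Int.mod_eq_emod_of_pos (by norm_num)]; omega
    simp only [PySem.List.enumerate_cons, PySem.List.enumerate_nil, List.foldl_cons, List.foldl_nil, h0, sewGo, ne_eq, not_true_eq_false, if_false]
  | s :: t :: rest, k, acc => by
    have h0 : PySem.Int.mod (2 * k) 2 = 0 := by
      rw [PySem.Int.mod_eq_emod_of_pos (by norm_num)]; omega
    have h1 : PySem.Int.mod (2 * k + 1) 2 = 1 := by
      rw [PySem.Int.mod_eq_emod_of_pos (by norm_num)]; omega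
    have hk : 2 * k + 1 + 1 = 2 * (k + 1) := by ring
    rw [PySem.List.enumerate_cons, PySem.List.enumerate_cons, hk]
    simp only [List.foldl_cons, h0, h1]
    rw [sew_fold_eq_go pattern add_pattern rest (k + 1)]
    cases add_pattern <;> simp [sewGo]

-- ===== VERDICT (by name: the statement is the Claim_ definition above) =====
theorem split_except_within_spec : Claim_equal_split_except_within := by
  intro text pattern add_pattern _ hpre
  unfold Spec_split_except_within split_except_within split_except_within_alt
  cases hsplit : PySem.Str.split? text pattern with
  | none => rfl
  | some segs =>
    simpa using sew_fold_eq_go pattern add_pattern segs 0 []
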